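-- pv_equiv track=rewrite | github.com/dwetterau/adventofcode | day3.py | distinct2
-- ===== SOURCE A (Python) =====
-- def distinct2(string):
--     visited = dict()
--     positions = [(0, 0), (0, 0)]
--     map = {"v": (0, -1), "^": (0, 1), "<": (-1, 0), ">": (1, 0)}
--     visited[positions[0]] = True
--     for index, char in enumerate(string):
--         delta = map[char]
--         which = index % 2
--         positions[which] = positions[which][0] + delta[0], positions[which][1] + delta[1]
--         visited[positions[which]] = True
--     return len(visited)
-- ===== SOURCE B (Python) =====
-- def distinct2(string):
--     deltas = {"v": (0, -1), "^": (0, 1), "<": (-1, 0), ">": (1, 0)}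
--     cells = {(0, 0)}
--     for stream in (string[0::2], string[1::2]):
--         x, y = 0, 0
--         for ch in stream:
--             dx, dy = deltas[ch]
--             x, y = x + dx, y + dy
--             cells.add((x, y))
--     return len(cells)
-- ===== Notes on version B (the rewrite author's own statement) =====
-- stated objective: alternative
-- what changed: Replaces the single interleaved loop with index%2 dispatch over a mutable two-slot position list by splitting the string into the two agents' move streams (string[0::2], string[1::2]) and running one independent pass per agent, accumulating positions into one shared set seeded with (0,0).
import Mathlib
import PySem

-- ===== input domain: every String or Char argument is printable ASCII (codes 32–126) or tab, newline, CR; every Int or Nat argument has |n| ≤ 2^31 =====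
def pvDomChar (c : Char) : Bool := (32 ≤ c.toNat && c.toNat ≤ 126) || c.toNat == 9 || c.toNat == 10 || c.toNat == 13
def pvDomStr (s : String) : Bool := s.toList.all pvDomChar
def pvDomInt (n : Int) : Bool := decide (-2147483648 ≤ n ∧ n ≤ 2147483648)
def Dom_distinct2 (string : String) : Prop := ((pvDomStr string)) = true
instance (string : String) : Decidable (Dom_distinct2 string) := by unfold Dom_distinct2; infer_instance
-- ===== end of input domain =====

-- B splits the string into the two agents' move streams and runs one pass per
-- agent into a shared set, instead of A's interleaved index%2-dispatched loop.

-- ===== PORT A =====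
-- the move dict of A; A's `map[char]` raises KeyError on other chars, which Pre_ excludes,
-- so the total `getD … (0,0)` agrees with Python wherever Pre_ holds
def pvMoveMapA : PySem.Dict Char (Int × Int) :=
  PySem.Dict.ofList [('v', (0, -1)), ('^', (0, 1)), ('<', (-1, 0)), ('>', (1, 0))]

-- the `for index, char in enumerate(string)` loop, with the two-slot positions list as (p0, p1)
def pvLoopA (vis : PySem.Dict (Int × Int) Bool) (p0 p1 : Int × Int) (i : Nat) :
    List Char → PySem.Dict (Int × Int) Bool
  | [] => vis
  | c :: cs =>
    let d := pvMoveMapA.getD c (0, 0)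
    if i % 2 == 0 then
      let q := (p0.1 + d.1, p0.2 + d.2)
      pvLoopA (vis.insert q true) q p1 (i + 1) cs
    else
      let q := (p1.1 + d.1, p1.2 + d.2)
      pvLoopA (vis.insert q true) p0 q (i + 1) cs

def distinct2 (string : String) : Int :=
  let init := (PySem.Dict.empty : PySem.Dict (Int × Int) Bool).insert (0, 0) true
  ((pvLoopA init (0, 0) (0, 0) 0 string.toList).size : Int)

-- ===== PORT B =====
def pvMoveMapB : PySem.Dict Char (Int × Int) :=
  PySem.Dict.ofList [('v', (0, -1)), ('^', (0, 1)), ('<', (-1, 0)), ('>', (1, 0))]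

-- hand port of the stride-2 slice s[0::2] (exact: every second element starting at 0)
def pvStride2 : List Char → List Char
  | [] => []
  | [c] => [c]
  | c :: _ :: cs => c :: pvStride2 cs

-- one agent's pass: walk a stream from (0,0), adding each visited cell to the set
def pvPassB (cells : PySem.Set (Int × Int)) (x y : Int) :
    List Char → PySem.Set (Int × Int)
  | [] => cells
  | c :: cs =>
    let d := pvMoveMapB.getD c (0, 0)
    pvPassB (cells.add (x + d.1, y + d.2)) (x + d.1) (y + d.2) cs

def distinct2_alt (string : String) : Int :=
  let l := string.toList
  let s1 := pvPassB (PySem.Set.add PySem.Set.empty (0, 0)) 0 0 (pvStride2 l)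
  let s2 := pvPassB s1 0 0 (pvStride2 l.tail)
  (PySem.Set.len s2 : Int)

-- ===== PRECONDITION & SPEC =====
-- Pre_ excludes exactly the strings containing a character other than v ^ < >,
-- on which Python A raises KeyError (map[char]).
def Pre_distinct2 (string : String) : Prop :=
  (string.toList.all fun c => c == 'v' || c == '^' || c == '<' || c == '>') = true
instance (string : String) : Decidable (Pre_distinct2 string) := by
  unfold Pre_distinct2; infer_instance

def pvWitness_distinct2 : String := "^>v<"

def Spec_distinct2 (string : String) (out : Int) : Prop := out = distinct2_alt string
instance (string : String) (out : Int) : Decidable (Spec_distinct2 string out) := by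
  unfold Spec_distinct2; infer_instance

-- ===== CLAIM (what is proved, stated in full; the proofs are below) =====
def Claim_equal_distinct2 : Prop :=
  ∀ (string : String), Dom_distinct2 string → Pre_distinct2 string →
    Spec_distinct2 string (distinct2 string)

-- ===== LEMMAS AND PROOFS =====

-- the sequence of cells an agent starting at p visits along a stream of moves
def pvPath (p : Int × Int) : List Char → List (Int × Int)
  | [] => []
  | c :: cs =>
    let d := pvMoveMapA.getD c (0, 0)
    (p.1 + d.1, p.2 + d.2) :: pvPath (p.1 + d.1, p.2 + d.2) cs

theorem pvStride2_cons (c : Char) (cs : List Char) :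
    pvStride2 (c :: cs) = c :: pvStride2 cs.tail := by
  cases cs <;> rfl

theorem mem_pvPassB (cs : List Char) :
    ∀ (cells : PySem.Set (Int × Int)) (x y : Int) (v : Int × Int),
      v ∈ pvPassB cells x y cs ↔ v ∈ cells ∨ v ∈ pvPath (x, y) cs := by
  induction cs with
  | nil => intro cells x y v; simp [pvPassB, pvPath]
  | cons c cs ih =>
    intro cells x y v
    simp only [pvPassB, pvPath, ih, PySem.Set.mem_add, List.mem_cons, pvMoveMapB, pvMoveMapA]
    tauto

theorem nodup_pvPassB (cs : List Char) :
    ∀ (cells : PySem.Set (Int × Int)) (x y : Int), cells.Nodup →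
      (pvPassB cells x y cs).Nodup := by
  induction cs with
  | nil => intro cells x y h; exact h
  | cons c cs ih =>
    intro cells x y h
    exact ih _ _ _ (PySem.Set.nodup_add _ _ h)

theorem mem_pvLoopA (cs : List Char) :
    ∀ (vis : PySem.Dict (Int × Int) Bool) (p0 p1 : Int × Int) (i : Nat) (v : Int × Int),
      v ∈ (pvLoopA vis p0 p1 i cs).keys ↔
        v ∈ vis.keys ∨
          (if i % 2 = 0 then
            v ∈ pvPath p0 (pvStride2 cs) ∨ v ∈ pvPath p1 (pvStride2 cs.tail)
          else
            v ∈ pvPath p1 (pvStride2 cs) ∨ v ∈ pvPath p0 (pvStride2 cs.tail)) := by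
  induction cs with
  | nil => intro vis p0 p1 i v; simp [pvLoopA, pvStride2, pvPath]
  | cons c cs ih =>
    intro vis p0 p1 i v
    rw [pvStride2_cons]
    rcases Nat.mod_two_eq_zero_or_one i with hi | hi
    · have hi1 : (i + 1) % 2 = 1 := by omega
      simp [pvLoopA, hi, hi1, ih, PySem.Dict.mem_keys_insert, pvPath]
      tauto
    · have hi1 : (i + 1) % 2 = 0 := by omega
      simp [pvLoopA, hi, hi1, ih, PySem.Dict.mem_keys_insert, pvPath]
      tauto

theorem nodup_pvLoopA (cs : List Char) :
    ∀ (vis : PySem.Dict (Int × Int) Bool) (p0 p1 : Int × Int) (i : Nat),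
      vis.keys.Nodup → (pvLoopA vis p0 p1 i cs).keys.Nodup := by
  induction cs with
  | nil => intro vis p0 p1 i h; exact h
  | cons c cs ih =>
    intro vis p0 p1 i h
    unfold pvLoopA
    split <;> exact ih _ _ _ _ (PySem.Dict.nodup_keys_insert _ _ _ h)

theorem pvSize_eq_keys_length {κ ν : Type} [BEq κ] (d : PySem.Dict κ ν) :
    d.size = d.keys.length := by
  simp [PySem.Dict.size, PySem.Dict.keys]

-- ===== VERDICT (by name: the statement is the Claim_ definition above) =====
theorem distinct2_spec : Claim_equal_distinct2 := by
  intro s _ _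
  unfold Spec_distinct2 distinct2 distinct2_alt
  have hinit : ((PySem.Dict.empty : PySem.Dict (Int × Int) Bool).insert (0, 0) true).keys
      = [(0, 0)] := by decide
  have hA := nodup_pvLoopA s.toList
    ((PySem.Dict.empty : PySem.Dict (Int × Int) Bool).insert (0, 0) true) (0, 0) (0, 0) 0
    (by rw [hinit]; simp)
  have hB := nodup_pvPassB (pvStride2 s.toList.tail) _ 0 0
    (nodup_pvPassB (pvStride2 s.toList) (PySem.Set.add PySem.Set.empty (0, 0)) 0 0 (by decide))
  have hmem : ∀ v : Int × Int,
      v ∈ (pvLoopA ((PySem.Dict.empty : PySem.Dict (Int × Int) Bool).insert (0, 0) true)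
            (0, 0) (0, 0) 0 s.toList).keys ↔
      v ∈ pvPassB (pvPassB (PySem.Set.add PySem.Set.empty (0, 0)) 0 0 (pvStride2 s.toList))
            0 0 (pvStride2 s.toList.tail) := by
    intro v
    rw [mem_pvLoopA, mem_pvPassB, mem_pvPassB, hinit]
    simp only [Nat.zero_mod, if_true, List.mem_singleton, PySem.Set.mem_add]
    have : v ∈ (PySem.Set.empty : PySem.Set (Int × Int)) ↔ False := by
      simp [PySem.Set.empty]
    rw [this]
    tauto
  have hperm := (List.perm_ext_iff_of_nodup hA hB).mpr hmem
  simp only [pvSize_eq_keys_length, PySem.Set.len, hperm.length_eq]
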